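-- pv_equiv track=rewrite | github.com/brianignacio5/the-search-engine | tsg/ranker/base.py | combine_and_or_scores
-- ===== SOURCE A (Python) =====
-- import operator
--
-- def combine_and_or_scores(and_dict, or_dict):
--     or_docs_not_in_and_docs = {}
--
--     for key, value in or_dict.items():
--         if key not in and_dict.keys():
--             or_docs_not_in_and_docs[key] = value
--
--     sorted_and = sorted(and_dict.items(), key = operator.itemgetter(1,0), reverse = True)
--     sorted_or = sorted(or_docs_not_in_and_docs.items(), key= operator.itemgetter(1,0), reverse= True)
--
--     combined_and_or_docs = sorted_and + sorted_or
--
--     return combined_and_or_docs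
-- ===== SOURCE B (Python) =====
-- def combine_and_or_scores(and_dict, or_dict):
--     combined = list(and_dict.items()) + [kv for kv in or_dict.items() if kv[0] not in and_dict]
--     return sorted(combined, key=lambda kv: (kv[0] in and_dict, kv[1], kv[0]), reverse=True)
-- ===== Notes on version B (the rewrite author's own statement) =====
-- stated objective: simpler
-- what changed: A's two separate descending sorts (and-items, then filtered or-items) plus concatenation are replaced by one sorted() call over the combined items with the composite key (key in and_dict, value, key), whose leading membership flag puts all and-items ahead of all or-items.
import Mathlib
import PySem

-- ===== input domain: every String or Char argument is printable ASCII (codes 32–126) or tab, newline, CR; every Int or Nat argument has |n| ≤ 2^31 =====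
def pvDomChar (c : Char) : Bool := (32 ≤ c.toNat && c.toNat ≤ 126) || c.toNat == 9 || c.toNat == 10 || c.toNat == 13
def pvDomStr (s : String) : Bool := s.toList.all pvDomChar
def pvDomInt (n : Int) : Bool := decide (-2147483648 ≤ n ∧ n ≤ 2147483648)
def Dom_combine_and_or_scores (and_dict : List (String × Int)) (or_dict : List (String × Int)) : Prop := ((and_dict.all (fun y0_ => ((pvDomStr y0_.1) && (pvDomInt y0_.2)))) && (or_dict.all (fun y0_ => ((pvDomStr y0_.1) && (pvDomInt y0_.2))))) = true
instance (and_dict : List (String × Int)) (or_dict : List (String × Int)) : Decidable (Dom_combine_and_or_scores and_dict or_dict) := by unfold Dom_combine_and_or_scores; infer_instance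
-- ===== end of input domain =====

-- B replaces A's two separate descending sorts and concatenation by ONE sort of the combined
-- items under the composite key (membership-in-and_dict, value, key); objective: simpler.

-- ===== PORT A =====
def combine_and_or_scores (and_dict : List (String × Int)) (or_dict : List (String × Int)) : List (String × Int) :=
  let ad := PySem.Dict.ofList and_dict
  let od := PySem.Dict.ofList or_dict
  -- for key, value in or_dict.items(): if key not in and_dict.keys(): or_docs_not_in_and_docs[key] = value
  let or_docs_not_in_and_docs :=
    od.items.foldl (fun d kv => if !(ad.contains kv.1) then d.insert kv.1 kv.2 else d) PySem.Dict.empty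
  let sorted_and := PySem.List.sorted2 ad.items (fun kv => kv.2) (fun kv => kv.1) true
  let sorted_or := PySem.List.sorted2 or_docs_not_in_and_docs.items (fun kv => kv.2) (fun kv => kv.1) true
  sorted_and ++ sorted_or

-- ===== PORT B =====
-- Python's 3-tuple key (kv[0] in and_dict, kv[1], kv[0]) compares lexicographically: ported
-- exactly as the lexicographic product Bool ×ₗ Int ×ₗ String.
def combine_and_or_scores_alt (and_dict : List (String × Int)) (or_dict : List (String × Int)) : List (String × Int) :=
  let ad := PySem.Dict.ofList and_dict
  let od := PySem.Dict.ofList or_dict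
  let combined := ad.items ++ od.items.filter (fun kv => !(ad.contains kv.1))
  PySem.List.sorted combined
    (fun kv => (toLex (ad.contains kv.1, toLex (kv.2, kv.1)) : Bool ×ₗ Int ×ₗ String)) true

-- ===== PRECONDITION & SPEC =====
def Spec_combine_and_or_scores (and_dict : List (String × Int)) (or_dict : List (String × Int)) (out : List (String × Int)) : Prop := out = combine_and_or_scores_alt and_dict or_dict
instance (and_dict : List (String × Int)) (or_dict : List (String × Int)) (out : List (String × Int)) : Decidable (Spec_combine_and_or_scores and_dict or_dict out) := by unfold Spec_combine_and_or_scores; infer_instance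

-- ===== CLAIM (what is proved, stated in full; the proofs are below) =====
def Claim_equal_combine_and_or_scores : Prop := ∀ (and_dict : List (String × Int)) (or_dict : List (String × Int)), Dom_combine_and_or_scores and_dict or_dict → Spec_combine_and_or_scores and_dict or_dict (combine_and_or_scores and_dict or_dict)

-- ===== LEMMAS AND PROOFS =====

-- sorted2 is sorted with the lexicographic pair key
lemma sorted2_eq_sorted_lex {α κ₁ κ₂ : Type} [LinearOrder κ₁] [LinearOrder κ₂]
    (xs : List α) (k1 : α → κ₁) (k2 : α → κ₂) (rev : Bool) :
    PySem.List.sorted2 xs k1 k2 rev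
      = PySem.List.sorted xs (fun x => (toLex (k1 x, k2 x) : κ₁ ×ₗ κ₂)) rev := by
  have h : ∀ a b : α, (decide (k1 a < k1 b) || (!decide (k1 b < k1 a) && decide (k2 a < k2 b)))
      = decide ((toLex (k1 a, k2 a) : κ₁ ×ₗ κ₂) < toLex (k1 b, k2 b)) := by
    intro a b
    rw [Bool.eq_iff_iff]
    simp only [Bool.or_eq_true, Bool.and_eq_true, Bool.not_eq_true', decide_eq_true_eq,
      decide_eq_false_iff_not, Prod.Lex.lt_iff]
    constructor
    · rintro (h1 | ⟨h1, h2⟩)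
      · exact Or.inl h1
      · rcases eq_or_lt_of_le (not_lt.mp h1) with he | hl
        · exact Or.inr ⟨he, h2⟩
        · exact Or.inl hl
    · rintro (h1 | ⟨h1, h2⟩)
      · exact Or.inl h1
      · exact Or.inr ⟨not_lt.mpr h1.le, h2⟩
  cases rev <;> simp [PySem.List.sorted2, PySem.List.sorted, h]

-- A's conditional-insert loop over fresh distinct keys builds exactly the filtered item list
lemma items_foldl_cond_insert (p : String × Int → Bool) :
    ∀ (l : List (String × Int)) (d : PySem.Dict String Int),
      (l.map Prod.fst).Nodup → (∀ kv ∈ l, d.contains kv.1 = false) →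
      (l.foldl (fun d kv => if p kv then d.insert kv.1 kv.2 else d) d).items
        = d.items ++ l.filter p := by
  intro l
  induction l with
  | nil => intro d _ _; simp
  | cons kv t ih =>
    intro d hnd hf
    have hkv : d.contains kv.1 = false := hf kv (List.mem_cons_self)
    have hnd' : kv.1 ∉ t.map Prod.fst ∧ (t.map Prod.fst).Nodup := by
      rw [List.map_cons] at hnd; exact List.nodup_cons.mp hnd
    simp only [List.foldl_cons, List.filter_cons]
    by_cases hp : p kv = true
    · rw [if_pos hp, if_pos hp]
      rw [ih (d.insert kv.1 kv.2) hnd'.2 ?_]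
      · rw [PySem.Dict.items_insert, hkv]
        simp
      · intro x hx
        rw [PySem.Dict.contains_insert]
        have hne : x.1 ≠ kv.1 := by
          intro hEq
          exact hnd'.1 (hEq ▸ List.mem_map_of_mem hx)
        simp [hne, hf x (List.mem_cons_of_mem _ hx)]
    · rw [if_neg hp, if_neg hp]
      exact ih d hnd'.2 (fun x hx => hf x (List.mem_cons_of_mem _ hx))

-- a block sorted descending by (value, key) over distinct keys and constant membership flag
-- is strictly descending under B's composite key
lemma part_pairwise (ad : PySem.Dict String Int) (l : List (String × Int)) (b : Bool)
    (hnd : (l.map Prod.fst).Nodup) (hflag : ∀ kv ∈ l, ad.contains kv.1 = b) :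
    (PySem.List.sorted l (fun kv => (toLex (kv.2, kv.1) : Int ×ₗ String)) true).Pairwise
      (fun x y => (toLex (ad.contains y.1, toLex (y.2, y.1)) : Bool ×ₗ Int ×ₗ String)
                    < toLex (ad.contains x.1, toLex (x.2, x.1))) := by
  have hp := PySem.List.sorted_pairwise_rev l (fun kv => (toLex (kv.2, kv.1) : Int ×ₗ String))
  have hne : (PySem.List.sorted l (fun kv => (toLex (kv.2, kv.1) : Int ×ₗ String)) true).Pairwise
      (fun x y => x.1 ≠ y.1) := by
    refine ((PySem.List.sorted_perm l _ true).pairwise_iff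
      (fun {_ _} h => Ne.symm h)).mpr ?_
    exact List.pairwise_map.mp hnd
  refine (hp.and hne).imp_of_mem ?_
  intro x y hx hy h
  obtain ⟨hle, hxy⟩ := h
  rw [hflag x ((PySem.List.mem_sorted _ _ _ _).mp hx), hflag y ((PySem.List.mem_sorted _ _ _ _).mp hy)]
  refine Prod.Lex.lt_iff.mpr (Or.inr ⟨rfl, ?_⟩)
  refine lt_of_le_of_ne hle (fun hEq => ?_)
  have : y.1 = x.1 := congrArg (fun z => (ofLex z).2) hEq
  exact hxy this.symm

-- ===== VERDICT (by name: the statement is the Claim_ definition above) =====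
theorem combine_and_or_scores_spec : Claim_equal_combine_and_or_scores := by
  intro and_dict or_dict _
  simp only [Spec_combine_and_or_scores, combine_and_or_scores, combine_and_or_scores_alt]
  set ad := PySem.Dict.ofList and_dict with had
  set od := PySem.Dict.ofList or_dict with hod
  have hkeysA : (ad.items.map Prod.fst).Nodup := PySem.Dict.nodup_keys_ofList and_dict
  have hkeysO : (od.items.map Prod.fst).Nodup := PySem.Dict.nodup_keys_ofList or_dict
  rw [items_foldl_cond_insert _ od.items PySem.Dict.empty hkeysO
    (fun kv _ => PySem.Dict.contains_empty kv.1)]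
  rw [sorted2_eq_sorted_lex, sorted2_eq_sorted_lex]
  rw [show (PySem.Dict.empty : PySem.Dict String Int).items = [] from rfl, List.nil_append]
  symm
  apply PySem.List.sorted_rev_eq_of_perm_of_pairwise_gt
  · exact (PySem.List.sorted_perm _ _ _).append (PySem.List.sorted_perm _ _ _)
  · rw [List.pairwise_append]
    refine ⟨part_pairwise ad ad.items true hkeysA ?_,
            part_pairwise ad _ false ?_ ?_, ?_⟩
    · intro kv hkv
      rw [PySem.Dict.contains_iff_mem_keys]
      exact List.mem_map_of_mem hkv
    · exact List.Nodup.sublist (List.Sublist.map Prod.fst List.filter_sublist) hkeysO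
    · intro kv hkv
      have := (List.mem_filter.mp hkv).2
      simpa using this
    · intro x hx y hy
      have hfx : ad.contains x.1 = true := by
        rw [PySem.Dict.contains_iff_mem_keys]
        exact List.mem_map_of_mem ((PySem.List.mem_sorted _ _ _ _).mp hx)
      have hfy : ad.contains y.1 = false := by
        have := (List.mem_filter.mp ((PySem.List.mem_sorted _ _ _ _).mp hy)).2
        simpa using this
      rw [hfx, hfy]
      exact Prod.Lex.lt_iff.mpr (Or.inl (show (false : Bool) < true from by decide))
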